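-- pv_equiv track=rewrite | github.com/ZeitOnline/deutschland_spricht | bucket_cut.py | cut_value_from_bucket_assignment
-- ===== SOURCE A (Python) =====
-- from typing import List, Tuple, Iterable, Optional
--
-- def hamming8(a: int, b: int) -> int:
--     """Hamming distance for 8-bit patterns (works for <=8 questions)."""
--     return (a ^ b).bit_count()
--
-- def cut_value_from_bucket_assignment(counts: List[int], side_pat: List[int], Q: int = 8) -> int:
--     """
--     Total cut = sum_{p<q, side[p]!=side[q]} counts[p]*counts[q]*dist(p,q)
--     """
--     P = len(counts)
--     total = 0
--     for p in range(P):
--         if counts[p] == 0: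
--             continue
--         sp = side_pat[p]
--         for q in range(p + 1, P):
--             if counts[q] == 0:
--                 continue
--             if sp != side_pat[q]:
--                 total += counts[p] * counts[q] * hamming8(p, q)
--     return total
-- ===== SOURCE B (Python) =====
-- from typing import List
--
-- def cut_value_from_bucket_assignment(counts: List[int], side_pat: List[int], Q: int = 8) -> int:
--     """
--     Same cut value, computed per bit in O(P log P):
--     popcount(p ^ q) = sum over bits b of [bit_b(p) != bit_b(q)], so the total cut is,
--     for each bit b, (cross count-weight of the bit partition) minus (the same restricted
--     to equal sides), summed over all bits that can differ between indices below P.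
--     """
--     P = len(counts)
--     bits = (P - 1).bit_length() if P > 1 else 0
--     total = 0
--     for b in range(bits):
--         sum_all = 0
--         sum_one = 0
--         per_side = {}
--         for p in range(P):
--             c = counts[p]
--             if c == 0:
--                 continue
--             s = side_pat[p]
--             one = c * ((p >> b) & 1)
--             sum_all += c
--             sum_one += one
--             sa, s1 = per_side.get(s, (0, 0))
--             per_side[s] = (sa + c, s1 + one)
--         cross = (sum_all - sum_one) * sum_one
--         for sa, s1 in per_side.values():
--             cross -= (sa - s1) * s1
--         total += cross
--     return total
-- ===== Notes on version B (the rewrite author's own statement) =====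
-- stated objective: faster
-- what changed: Instead of summing counts[p]*counts[q]*popcount(p^q) over all O(P^2) index pairs, B decomposes the Hamming distance per bit: for each of the O(log P) bits it accumulates, in one pass with a per-side dictionary of (total, bit-set) count-sums, the cross-product of the bit partition minus its same-side part, and sums these per-bit cross terms.
import Mathlib
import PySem

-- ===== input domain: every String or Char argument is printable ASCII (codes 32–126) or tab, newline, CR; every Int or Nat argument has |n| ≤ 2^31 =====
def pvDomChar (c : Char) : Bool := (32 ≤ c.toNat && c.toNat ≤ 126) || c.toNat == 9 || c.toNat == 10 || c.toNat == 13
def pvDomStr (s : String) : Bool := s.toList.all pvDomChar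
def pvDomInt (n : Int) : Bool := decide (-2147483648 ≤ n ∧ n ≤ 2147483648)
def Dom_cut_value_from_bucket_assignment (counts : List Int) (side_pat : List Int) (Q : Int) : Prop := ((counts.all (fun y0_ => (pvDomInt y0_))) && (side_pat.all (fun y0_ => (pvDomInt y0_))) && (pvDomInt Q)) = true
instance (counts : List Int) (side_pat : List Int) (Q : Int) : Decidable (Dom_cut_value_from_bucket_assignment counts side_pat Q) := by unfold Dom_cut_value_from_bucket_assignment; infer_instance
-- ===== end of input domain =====

-- B computes the same cut value per bit of the Hamming distance in one pass per bit
-- (per-side count-sums in a dict) instead of iterating over all O(P^2) index pairs.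


-- ===== PORT A =====
-- hamming8(a, b) = (a ^ b).bit_count()
def hamming8 (a b : Int) : Int := (PySem.Int.bitCount (PySem.Int.bxor a b) : Int)

-- body of the inner 'for q' loop
def cutA_inner (counts side_pat : List Int) (sp p : Int) (total : Int) (q : Int) : Int :=
  if PySem.List.pyGetD counts q 0 = 0 then total
  else if sp ≠ PySem.List.pyGetD side_pat q 0 then
    total + PySem.List.pyGetD counts p 0 * PySem.List.pyGetD counts q 0 * hamming8 p q
  else total

-- body of the outer 'for p' loop
def cutA_row (counts side_pat : List Int) (P : Int) (total : Int) (p : Int) : Int :=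
  if PySem.List.pyGetD counts p 0 = 0 then total
  else
    let sp := PySem.List.pyGetD side_pat p 0    -- side_pat[p]; raising indices are excluded by Pre_
    (PySem.List.pyRange (p + 1) P).foldl (cutA_inner counts side_pat sp p) total

def cut_value_from_bucket_assignment (counts : List Int) (side_pat : List Int) (Q : Int) : Int :=
  let P : Int := counts.length
  (PySem.List.pyRange 0 P).foldl (cutA_row counts side_pat P) 0

-- ===== PORT B =====
-- body of the inner 'for p' loop: update (sum_all, sum_one, per_side)
def cutB_step (counts side_pat : List Int) (b : Nat)
    (st : Int × Int × PySem.Dict Int (Int × Int)) (p : Int) : Int × Int × PySem.Dict Int (Int × Int) :=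
  let c := PySem.List.pyGetD counts p 0
  if c = 0 then st
  else
    let s := PySem.List.pyGetD side_pat p 0   -- side_pat[p]; raising indices are excluded by Pre_
    let one := c * PySem.Int.band (p >>> b) 1
    let v := st.2.2.getD s (0, 0)
    (st.1 + c, st.2.1 + one, st.2.2.insert s (v.1 + c, v.2 + one))

-- body of the outer 'for b' loop: one bit's cross term
def cutB_bit (counts side_pat : List Int) (P : Int) (total : Int) (b : Nat) : Int :=
  let st := (PySem.List.pyRange 0 P).foldl (cutB_step counts side_pat b)
    ((0 : Int), (0 : Int), (PySem.Dict.empty : PySem.Dict Int (Int × Int)))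
  let cross := st.2.2.values.foldl (fun cross v => cross - (v.1 - v.2) * v.2)
    ((st.1 - st.2.1) * st.2.1)
  total + cross

def cut_value_from_bucket_assignment_alt (counts : List Int) (side_pat : List Int) (Q : Int) : Int :=
  let P : Int := counts.length
  let bits : Nat := if 1 < counts.length then PySem.Int.bitLength (P - 1) else 0
  (List.range bits).foldl (cutB_bit counts side_pat P) 0

-- ===== PRECONDITION & SPEC =====
-- Pre_ excludes exactly the IndexError inputs: A reads side_pat[p] for every p with counts[p] ≠ 0.
def Pre_cut_value_from_bucket_assignment (counts : List Int) (side_pat : List Int) (Q : Int) : Prop :=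
  ∀ i, i < counts.length → counts.getD i 0 ≠ 0 → i < side_pat.length
instance (counts : List Int) (side_pat : List Int) (Q : Int) : Decidable (Pre_cut_value_from_bucket_assignment counts side_pat Q) := by unfold Pre_cut_value_from_bucket_assignment; infer_instance
def pvWitness_cut_value_from_bucket_assignment : List Int × List Int × Int := ([1, 2, 3], [0, 1, 0], 8)

def Spec_cut_value_from_bucket_assignment (counts : List Int) (side_pat : List Int) (Q : Int) (out : Int) : Prop := out = cut_value_from_bucket_assignment_alt counts side_pat Q
instance (counts : List Int) (side_pat : List Int) (Q : Int) (out : Int) : Decidable (Spec_cut_value_from_bucket_assignment counts side_pat Q out) := by unfold Spec_cut_value_from_bucket_assignment; infer_instance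

-- ===== CLAIM (what is proved, stated in full; the proofs are below) =====
def Claim_equal_cut_value_from_bucket_assignment : Prop := ∀ (counts : List Int) (side_pat : List Int) (Q : Int), Dom_cut_value_from_bucket_assignment counts side_pat Q → Pre_cut_value_from_bucket_assignment counts side_pat Q → Spec_cut_value_from_bucket_assignment counts side_pat Q (cut_value_from_bucket_assignment counts side_pat Q)


-- ===== LEMMAS AND PROOFS =====

-- value/side/bit accessors used by the proof (Nat-indexed views of the lists)
def cv (cs : List Int) (i : Nat) : Int := cs.getD i 0
def sv (ss : List Int) (i : Nat) : Int := ss.getD i 0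
def bitv (b i : Nat) : Int := if i.testBit b then 1 else 0
def hamN (i j : Nat) : Int := (PySem.Int.bitCount ((i ^^^ j : Nat) : Int) : Int)
def fval (v : Int × Int) : Int := (v.1 - v.2) * v.2
def bitsOf (n : Nat) : Nat := if 1 < n then PySem.Int.bitLength ((n : Int) - 1) else 0

-- pair weights
def wham (cs ss : List Int) (i j : Nat) : Int :=
  if sv ss i ≠ sv ss j then cv cs i * cv cs j * hamN i j else 0
def wall (cs : List Int) (b i j : Nat) : Int :=
  if i.testBit b ≠ j.testBit b then cv cs i * cv cs j else 0
def wsame (cs ss : List Int) (b i j : Nat) : Int :=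
  if sv ss i = sv ss j ∧ i.testBit b ≠ j.testBit b then cv cs i * cv cs j else 0
def wbit (cs ss : List Int) (b i j : Nat) : Int :=
  if sv ss i ≠ sv ss j ∧ i.testBit b ≠ j.testBit b then cv cs i * cv cs j else 0

-- triangle sums, grouped by the larger / the smaller index
def Tri (w : Nat → Nat → Int) (n : Nat) : Int := ∑ j ∈ Finset.range n, ∑ i ∈ Finset.range j, w i j
def TriA (w : Nat → Nat → Int) (n : Nat) : Int := ∑ i ∈ Finset.range n, ∑ j ∈ Finset.Ico (i+1) n, w i j

-- B's inner-loop step and prefix state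
def stepB (cs ss : List Int) (b : Nat) (st : Int × Int × PySem.Dict Int (Int × Int)) (i : Nat) :
    Int × Int × PySem.Dict Int (Int × Int) :=
  let c := cv cs i
  if c = 0 then st
  else
    let s := sv ss i
    let one := c * bitv b i
    let v := st.2.2.getD s (0, 0)
    (st.1 + c, st.2.1 + one, st.2.2.insert s (v.1 + c, v.2 + one))
def bstate (cs ss : List Int) (b n : Nat) : Int × Int × PySem.Dict Int (Int × Int) :=
  (List.range n).foldl (stepB cs ss b) ((0 : Int), (0 : Int), PySem.Dict.empty)

def gsum (cs ss : List Int) (s : Int) (n : Nat) : Int :=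
  ∑ i ∈ Finset.range n, if sv ss i = s then cv cs i else 0
def gsum1 (cs ss : List Int) (b : Nat) (s : Int) (n : Nat) : Int :=
  ∑ i ∈ Finset.range n, if sv ss i = s then cv cs i * bitv b i else 0

def waq (cs ss : List Int) (i j : Nat) : Int :=
  if cv cs j = 0 then 0
  else if sv ss i ≠ sv ss j then cv cs i * cv cs j * hamN i j else 0
def Fa (cs ss : List Int) (i : Nat) : Int :=
  if cv cs i = 0 then 0 else ∑ j ∈ Finset.Ico (i+1) cs.length, waq cs ss i j

lemma sum_map_range (f : Nat → Int) (n : Nat) :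
    ((List.range n).map f).sum = ∑ i ∈ Finset.range n, f i := by
  induction n with
  | zero => simp
  | succ n ih => simp [List.range_succ, Finset.sum_range_succ, ih]

lemma sum_map_range' (f : Nat → Int) (k : Nat) : ∀ a : Nat,
    ((List.range' a k).map f).sum = ∑ j ∈ Finset.Ico a (a + k), f j := by
  induction k with
  | zero => intro a; simp
  | succ k ih =>
    intro a
    rw [List.range'_succ, Finset.sum_eq_sum_Ico_succ_bot (by omega)]
    rw [show a + (k+1) = (a+1) + k by omega]
    simp [ih (a+1)]
lemma pyRange_nil (a b : Int) (h : b ≤ a) : PySem.List.pyRange a b = [] := by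
  refine List.eq_nil_iff_forall_not_mem.mpr fun x hx => ?_
  have := (PySem.List.mem_pyRange_one).1 hx
  omega

lemma pyRange_natCast (a b : Nat) :
    PySem.List.pyRange (a : Int) (b : Int) = (List.range' a (b - a)).map (fun k : Nat => (k : Int)) := by
  induction b with
  | zero =>
    rw [show ((0:Nat):Int) = 0 from rfl, pyRange_nil _ _ (by exact_mod_cast Nat.zero_le a)]
    simp
  | succ b ih =>
    by_cases h : a ≤ b
    · have h' : (a:Int) ≤ (b:Int) := by exact_mod_cast h
      rw [show ((b+1 : Nat) : Int) = (b:Int) + 1 by push_cast; ring]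
      rw [PySem.List.pyRange_one_succ_right h', ih,
          show b + 1 - a = (b - a) + 1 by omega, List.range'_concat,
          show a + 1 * (b - a) = b by omega]
      simp
    · have hb : (b:Int) + 1 ≤ (a:Int) := by exact_mod_cast (by omega : b + 1 ≤ a)
      rw [show ((b+1 : Nat) : Int) = (b:Int) + 1 by push_cast; ring]
      rw [pyRange_nil _ _ hb, show b + 1 - a = 0 by omega]
      simp

lemma band_shift (i b : Nat) : PySem.Int.band ((i : Int) >>> b) 1 = bitv b i := by
  unfold bitv
  rw [← Int.natCast_shiftRight, show (1:Int) = ((1:Nat):Int) from rfl, PySem.Int.band_natCast]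
  rw [Nat.and_one_is_mod]
  have ht : i.testBit b = decide (i >>> b % 2 = 1) := by
    simp [Nat.testBit]
  rcases Nat.mod_two_eq_zero_or_one (i >>> b) with h | h <;> simp [ht, h]

lemma Tri_succ (w : Nat → Nat → Int) (n : Nat) :
    Tri w (n+1) = Tri w n + ∑ i ∈ Finset.range n, w i n := by
  simp [Tri, Finset.sum_range_succ]

lemma triA_eq_tri (w : Nat → Nat → Int) (n : Nat) : TriA w n = Tri w n := by
  induction n with
  | zero => simp [Tri, TriA]
  | succ n ih =>
    rw [Tri_succ, ← ih]
    unfold TriA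
    rw [Finset.sum_range_succ, show (∑ j ∈ Finset.Ico (n+1) (n+1), w n j) = 0 by simp, add_zero,
        ← Finset.sum_add_distrib]
    refine Finset.sum_congr rfl fun i hi => ?_
    have : i < n := Finset.mem_range.1 hi
    rw [Finset.sum_Ico_succ_top (by omega)]

lemma bitcount_eq_sum (B : Nat) : ∀ m : Nat, m < 2 ^ B →
    (PySem.Int.bitCount (m : Int) : Int) = ∑ b ∈ Finset.range B, (if m.testBit b then (1:Int) else 0) := by
  induction B with
  | zero =>
    intro m hm
    have : m = 0 := by omega
    subst this
    simp
  | succ B ih =>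
    intro m hm
    rcases Nat.eq_zero_or_pos m with h0 | hp
    · subst h0; simp [Nat.zero_testBit]
    · rw [PySem.Int.bitCount_natCast hp, Finset.sum_range_succ']
      have hd : m / 2 < 2 ^ B := by rw [pow_succ] at hm; omega
      have h2 := ih (m/2) hd
      simp only [Nat.testBit_add_one]
      rw [← h2]
      have h0 : (if m.testBit 0 then (1:Int) else 0) = ((m % 2 : Nat) : Int) := by
        rw [Nat.testBit_zero]
        rcases Nat.mod_two_eq_zero_or_one m with h | h <;> simp [h]
      rw [h0]
      push_cast
      ring

lemma A_eq (cs ss : List Int) (Q : Int) :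
    cut_value_from_bucket_assignment cs ss Q = TriA (wham cs ss) cs.length := by
  simp only [cut_value_from_bucket_assignment]
  rw [PySem.List.pyRange_zero_natCast, List.foldl_map]
  refine (PySem.List.foldl_congr_mem _ _ (fun acc i => acc + Fa cs ss i) 0 ?_).trans ?_
  · intro acc i hi
    have hi' : i < cs.length := List.mem_range.mp hi
    simp only [cutA_row, PySem.List.pyGetD_natCast]
    by_cases hc : cs.getD i 0 = 0
    · rw [if_pos hc]
      have h0 : Fa cs ss i = 0 := by simp only [Fa]; rw [if_pos (by simpa [cv] using hc)]
      rw [h0, add_zero]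
    · rw [if_neg hc]
      rw [show ((i:Int) + 1) = ((i + 1 : Nat) : Int) by push_cast; ring]
      rw [pyRange_natCast, List.foldl_map]
      refine (PySem.List.foldl_congr_mem _ _ (fun acc j => acc + waq cs ss i j) acc ?_).trans ?_
      · intro acc2 j _
        simp only [cutA_inner, PySem.List.pyGetD_natCast]
        have hham : hamming8 (↑i) (↑j) = hamN i j := by
          simp [hamming8, hamN, PySem.Int.bxor_natCast]
        rw [hham]
        unfold waq cv sv
        split_ifs <;> ring
      · rw [PySem.List.foldl_add,
            sum_map_range' (waq cs ss i) (cs.length - (i+1)) (i+1),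
            show (i+1) + (cs.length - (i+1)) = cs.length by omega]
        simp only [Fa]
        rw [if_neg (by simpa [cv] using hc)]
  · rw [PySem.List.foldl_add, sum_map_range, zero_add]
    unfold TriA
    refine Finset.sum_congr rfl fun i _ => ?_
    by_cases hc : cv cs i = 0
    · simp only [Fa]
      rw [if_pos hc]
      refine (Finset.sum_eq_zero fun j _ => ?_).symm
      simp [wham, hc]
    · simp only [Fa]
      rw [if_neg hc]
      refine Finset.sum_congr rfl fun j _ => ?_
      by_cases hcj : cv cs j = 0
      · simp [waq, wham, hcj]
      · unfold waq wham
        rw [if_neg hcj]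

lemma sum_map_replace (f : Int × Int → Int) (s : Int) (v w : Int × Int) :
    ∀ l : List (Int × (Int × Int)), (l.map Prod.fst).Nodup → (s, v) ∈ l →
    ((l.map (fun p => if p.1 == s then (s, w) else p)).map (fun kv => f kv.2)).sum
      = (l.map (fun kv => f kv.2)).sum - f v + f w := by
  intro l
  induction l with
  | nil => intro _ hm; cases hm
  | cons p l ih =>
    intro hnod hm
    rw [List.map_cons, List.nodup_cons] at hnod
    rcases List.mem_cons.1 hm with he | hm'
    · cases he.symm
      simp only [List.map_cons]
      rw [if_pos (by simp)]
      have hid : l.map (fun q => if q.1 == s then (s, w) else q) = l := by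
        have h1 : ∀ q ∈ l, (if q.1 == s then (s, w) else q) = q := by
          intro q hq
          have hne : q.1 ≠ s := by
            intro h
            have hq1 : q.1 ∈ l.map Prod.fst := List.mem_map_of_mem hq
            exact hnod.1 (h ▸ hq1)
          exact if_neg (by simp [hne])
        calc l.map (fun q => if q.1 == s then (s, w) else q) = l.map id :=
              List.map_eq_map_iff.mpr h1
          _ = l := List.map_id l
      rw [hid]
      simp only [List.map_cons, List.sum_cons]
      ring
    · have hsmem : s ∈ l.map Prod.fst := by
        simpa using List.mem_map_of_mem (f := Prod.fst) hm'
      have hne : p.1 ≠ s := fun h => hnod.1 (h ▸ hsmem)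
      simp only [List.map_cons, List.sum_cons]
      rw [if_neg (by simp [hne]), ih hnod.2 hm']
      ring

lemma sum_map_neg' (l : List (Int × (Int × Int))) :
    (l.map (fun kv => -((kv.2.1 - kv.2.2) * kv.2.2))).sum
      = -((l.map (fun kv => fval kv.2)).sum) := by
  induction l with
  | nil => simp
  | cons p l ih => simp [ih, fval]; ring

lemma inner_eq (cs ss : List Int) (b : Nat) :
    (PySem.List.pyRange 0 (cs.length : Int)).foldl (cutB_step cs ss b)
      ((0 : Int), (0 : Int), (PySem.Dict.empty : PySem.Dict Int (Int × Int)))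
      = bstate cs ss b cs.length := by
  rw [PySem.List.pyRange_zero_natCast, List.foldl_map, bstate]
  refine PySem.List.foldl_congr_mem _ _ _ _ ?_
  intro st i _
  simp only [cutB_step, stepB, PySem.List.pyGetD_natCast, band_shift, cv, sv]

lemma bstate_inv (cs ss : List Int) (b : Nat) (n : Nat) :
    (bstate cs ss b n).1 = (∑ i ∈ Finset.range n, cv cs i)
  ∧ (bstate cs ss b n).2.1 = (∑ i ∈ Finset.range n, cv cs i * bitv b i)
  ∧ (bstate cs ss b n).2.2.keys.Nodup
  ∧ (∀ s, (bstate cs ss b n).2.2.getD s (0,0) = (gsum cs ss s n, gsum1 cs ss b s n))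
  ∧ (((bstate cs ss b n).2.2.items.map (fun kv => fval kv.2)).sum = Tri (wsame cs ss b) n) := by
  induction n with
  | zero =>
    refine ⟨by simp [bstate], by simp [bstate], ?_, ?_, ?_⟩
    · simp only [bstate, List.range_zero, List.foldl_nil]
      exact PySem.Dict.nodup_keys_empty
    · intro s
      simp only [bstate, List.range_zero, List.foldl_nil]
      rw [PySem.Dict.getD_empty]
      simp [gsum, gsum1]
    · simp only [bstate, List.range_zero, List.foldl_nil]
      simp [Tri, PySem.Dict.empty]
  | succ n ih =>
    obtain ⟨ih1, ih2, ihnd, ihg, ihs⟩ := ih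
    have hstep : bstate cs ss b (n+1) = stepB cs ss b (bstate cs ss b n) n := by
      simp [bstate, List.range_succ]
    rw [hstep]
    by_cases hc : cv cs n = 0
    · have hs0 : stepB cs ss b (bstate cs ss b n) n = bstate cs ss b n := by
        simp [stepB, hc]
      rw [hs0]
      refine ⟨?_, ?_, ihnd, ?_, ?_⟩
      · rw [ih1, Finset.sum_range_succ, hc, add_zero]
      · rw [ih2, Finset.sum_range_succ, hc, zero_mul, add_zero]
      · intro s
        rw [ihg s]
        have h1 : gsum cs ss s (n+1) = gsum cs ss s n := by
          unfold gsum; rw [Finset.sum_range_succ, hc]; simp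
        have h2 : gsum1 cs ss b s (n+1) = gsum1 cs ss b s n := by
          unfold gsum1; rw [Finset.sum_range_succ, hc]; simp
        rw [h1, h2]
      · rw [ihs, Tri_succ]
        have h0 : ∑ i ∈ Finset.range n, wsame cs ss b i n = 0 :=
          Finset.sum_eq_zero fun i _ => by simp [wsame, hc]
        rw [h0, add_zero]
    · have hv : (bstate cs ss b n).2.2.getD (sv ss n) (0,0)
          = (gsum cs ss (sv ss n) n, gsum1 cs ss b (sv ss n) n) := ihg _
      have hstep2 : stepB cs ss b (bstate cs ss b n) n
          = ((bstate cs ss b n).1 + cv cs n, (bstate cs ss b n).2.1 + cv cs n * bitv b n,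
             (bstate cs ss b n).2.2.insert (sv ss n)
               (gsum cs ss (sv ss n) n + cv cs n, gsum1 cs ss b (sv ss n) n + cv cs n * bitv b n)) := by
        simp [stepB, hc, hv]
      rw [hstep2]
      refine ⟨?_, ?_, PySem.Dict.nodup_keys_insert _ _ _ ihnd, ?_, ?_⟩
      · show (bstate cs ss b n).1 + cv cs n = _
        rw [ih1, Finset.sum_range_succ]
      · show (bstate cs ss b n).2.1 + cv cs n * bitv b n = _
        rw [ih2, Finset.sum_range_succ]
      · intro s
        show ((bstate cs ss b n).2.2.insert (sv ss n) _).getD s (0,0) = _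
        rw [PySem.Dict.getD_insert]
        by_cases hss : s = sv ss n
        · rw [if_pos hss]
          subst hss
          unfold gsum gsum1
          rw [Finset.sum_range_succ, Finset.sum_range_succ]
          simp
        · rw [if_neg hss, ihg s]
          have h2 : ¬ (sv ss n = s) := fun h => hss h.symm
          unfold gsum gsum1
          rw [Finset.sum_range_succ, Finset.sum_range_succ]
          simp [h2]
      · show (((bstate cs ss b n).2.2.insert (sv ss n)
            (gsum cs ss (sv ss n) n + cv cs n, gsum1 cs ss b (sv ss n) n + cv cs n * bitv b n)).items.map
            (fun kv => fval kv.2)).sum = _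
        rw [Tri_succ, ← ihs]
        have hkeysnd : ((bstate cs ss b n).2.2.items.map Prod.fst).Nodup := by
          simpa [PySem.Dict.keys] using ihnd
        have hIns : (((bstate cs ss b n).2.2.insert (sv ss n)
              (gsum cs ss (sv ss n) n + cv cs n, gsum1 cs ss b (sv ss n) n + cv cs n * bitv b n)).items.map
              (fun kv => fval kv.2)).sum
            = ((bstate cs ss b n).2.2.items.map (fun kv => fval kv.2)).sum
              - fval (gsum cs ss (sv ss n) n, gsum1 cs ss b (sv ss n) n)
              + fval (gsum cs ss (sv ss n) n + cv cs n, gsum1 cs ss b (sv ss n) n + cv cs n * bitv b n) := by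
          rw [PySem.Dict.items_insert]
          by_cases hcont : (bstate cs ss b n).2.2.contains (sv ss n) = true
          · rw [if_pos hcont]
            have hget : (bstate cs ss b n).2.2.get? (sv ss n)
                = some (gsum cs ss (sv ss n) n, gsum1 cs ss b (sv ss n) n) := by
              rw [PySem.Dict.contains_eq_isSome_get?] at hcont
              obtain ⟨u, hu⟩ := Option.isSome_iff_exists.mp hcont
              have hgd := PySem.Dict.getD_of_get?_eq_some _ ((0,0) : Int × Int) hu
              have huv : u = (gsum cs ss (sv ss n) n, gsum1 cs ss b (sv ss n) n) := by
                rw [← hv]; exact hgd.symm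
              rw [hu, huv]
            have hmem := PySem.Dict.mem_items_of_get?_eq_some _ hget
            exact sum_map_replace fval (sv ss n) _ _ _ hkeysnd hmem
          · have hcf : (bstate cs ss b n).2.2.contains (sv ss n) = false := by
              simpa using hcont
            rw [if_neg (by simp [hcf])]
            have hval : ((gsum cs ss (sv ss n) n, gsum1 cs ss b (sv ss n) n) : Int × Int)
                = ((0,0) : Int × Int) :=
              hv.symm.trans (PySem.Dict.getD_of_not_contains _ _ hcf)
            rw [List.map_append, List.sum_append, hval]
            simp [fval]
        rw [hIns]
        have hD : fval (gsum cs ss (sv ss n) n + cv cs n, gsum1 cs ss b (sv ss n) n + cv cs n * bitv b n)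
            - fval (gsum cs ss (sv ss n) n, gsum1 cs ss b (sv ss n) n)
            = ∑ i ∈ Finset.range n, wsame cs ss b i n := by
          cases hn : n.testBit b
          · have hb0 : bitv b n = 0 := by simp [bitv, hn]
            rw [hb0]
            have hsw : ∑ i ∈ Finset.range n, wsame cs ss b i n
                = cv cs n * gsum1 cs ss b (sv ss n) n := by
              unfold gsum1
              rw [Finset.mul_sum]
              refine Finset.sum_congr rfl fun i _ => ?_
              unfold wsame bitv
              by_cases hsi : sv ss i = sv ss n <;> cases hib : i.testBit b <;>
                simp [hsi, hib, hn] <;> ring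
            rw [hsw]; unfold fval; ring
          · have hb1 : bitv b n = 1 := by simp [bitv, hn]
            rw [hb1]
            have hsw : ∑ i ∈ Finset.range n, wsame cs ss b i n
                = cv cs n * (gsum cs ss (sv ss n) n - gsum1 cs ss b (sv ss n) n) := by
              unfold gsum gsum1
              rw [← Finset.sum_sub_distrib, Finset.mul_sum]
              refine Finset.sum_congr rfl fun i _ => ?_
              unfold wsame bitv
              by_cases hsi : sv ss i = sv ss n <;> cases hib : i.testBit b <;>
                simp [hsi, hib, hn] <;> ring
            rw [hsw]; unfold fval; ring
        linarith [hD]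

lemma cross_all (cs : List Int) (b : Nat) (n : Nat) :
    ((∑ i ∈ Finset.range n, cv cs i) - (∑ i ∈ Finset.range n, cv cs i * bitv b i))
      * (∑ i ∈ Finset.range n, cv cs i * bitv b i) = Tri (wall cs b) n := by
  induction n with
  | zero => simp [Tri]
  | succ n ih =>
    rw [Finset.sum_range_succ, Finset.sum_range_succ, Tri_succ, ← ih]
    cases hn : n.testBit b
    · have hb : bitv b n = 0 := by simp [bitv, hn]
      have hw : ∑ i ∈ Finset.range n, wall cs b i n
          = (∑ i ∈ Finset.range n, cv cs i * bitv b i) * cv cs n := by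
        rw [Finset.sum_mul]
        refine Finset.sum_congr rfl fun i _ => ?_
        unfold wall bitv
        cases hi : i.testBit b <;> simp [hi, hn] <;> ring
      rw [hw, hb]; ring
    · have hb : bitv b n = 1 := by simp [bitv, hn]
      have hw : ∑ i ∈ Finset.range n, wall cs b i n
          = ((∑ i ∈ Finset.range n, cv cs i) - (∑ i ∈ Finset.range n, cv cs i * bitv b i)) * cv cs n := by
        rw [← Finset.sum_sub_distrib, Finset.sum_mul]
        refine Finset.sum_congr rfl fun i _ => ?_
        unfold wall bitv
        cases hi : i.testBit b <;> simp [hi, hn] <;> ring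
      rw [hw, hb]; ring

lemma B_eq (cs ss : List Int) (Q : Int) :
    cut_value_from_bucket_assignment_alt cs ss Q
      = ∑ b ∈ Finset.range (bitsOf cs.length),
          (Tri (wall cs b) cs.length - Tri (wsame cs ss b) cs.length) := by
  simp only [cut_value_from_bucket_assignment_alt]
  rw [show (if 1 < cs.length then PySem.Int.bitLength ((cs.length : Int) - 1) else 0)
        = bitsOf cs.length from rfl]
  refine (PySem.List.foldl_congr_mem _ _
    (fun total b => total + (Tri (wall cs b) cs.length - Tri (wsame cs ss b) cs.length)) 0 ?_).trans ?_
  · intro total b _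
    simp only [cutB_bit]
    rw [inner_eq]
    obtain ⟨h1, h2, hnd, hg, hs⟩ := bstate_inv cs ss b cs.length
    congr 1
    refine (PySem.List.foldl_congr_mem _ _
      (fun cross v => cross + (-((v.1 - v.2) * v.2))) _ ?_).trans ?_
    · intro acc v _; ring
    · rw [PySem.List.foldl_add]
      simp only [PySem.Dict.values]
      rw [List.map_map]
      simp only [Function.comp_def]
      rw [sum_map_neg', hs, h1, h2, cross_all cs b cs.length]
      ring
  · rw [PySem.List.foldl_add, sum_map_range, zero_add]

lemma wall_sub_wsame (cs ss : List Int) (b n : Nat) :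
    Tri (wall cs b) n - Tri (wsame cs ss b) n = Tri (wbit cs ss b) n := by
  unfold Tri
  rw [← Finset.sum_sub_distrib]
  refine Finset.sum_congr rfl fun j _ => ?_
  rw [← Finset.sum_sub_distrib]
  refine Finset.sum_congr rfl fun i _ => ?_
  unfold wall wsame wbit
  by_cases h : sv ss i = sv ss j <;> by_cases h2 : i.testBit b = j.testBit b <;> simp [h, h2]

lemma sum_tri_wbit (cs ss : List Int) (n : Nat) :
    ∑ b ∈ Finset.range (bitsOf n), Tri (wbit cs ss b) n = Tri (wham cs ss) n := by
  by_cases h1 : 1 < n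
  · have hbits : ∀ i, i < n → i < 2 ^ bitsOf n := by
      intro i hi
      have h2 : ((n:Int) - 1) = ((n - 1 : Nat) : Int) := by omega
      have h3 := PySem.Int.lt_two_pow_bitLength ((n - 1 : Nat) : Int)
      rw [Int.natAbs_natCast] at h3
      unfold bitsOf
      rw [if_pos h1, h2]
      omega
    unfold Tri
    rw [Finset.sum_comm]
    refine Finset.sum_congr rfl fun j hj => ?_
    rw [Finset.sum_comm]
    refine Finset.sum_congr rfl fun i hi => ?_
    have hjn : j < n := Finset.mem_range.1 hj
    have hij : i < j := Finset.mem_range.1 hi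
    by_cases hs : sv ss i ≠ sv ss j
    · have hterm : ∀ b, wbit cs ss b i j
          = cv cs i * cv cs j * (if (i ^^^ j).testBit b then (1:Int) else 0) := by
        intro b
        unfold wbit
        cases hbi : i.testBit b <;> cases hbj : j.testBit b <;>
          simp [hs, hbi, hbj, Nat.testBit_xor] <;> ring
      rw [Finset.sum_congr rfl fun b _ => hterm b, ← Finset.mul_sum]
      rw [← bitcount_eq_sum (bitsOf n) (i ^^^ j)
            (Nat.xor_lt_two_pow (hbits i (by omega)) (hbits j hjn))]
      unfold wham hamN
      rw [if_pos hs]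
    · rw [not_not] at hs
      unfold wbit wham
      simp [hs]
  · have hb : bitsOf n = 0 := by unfold bitsOf; rw [if_neg h1]
    rw [hb]
    have hn : n = 0 ∨ n = 1 := by omega
    rcases hn with h | h <;> subst h <;> simp [Tri]

-- ===== VERDICT (by name: the statement is the Claim_ definition above) =====
theorem cut_value_from_bucket_assignment_spec : Claim_equal_cut_value_from_bucket_assignment := by
  intro counts side_pat Q _ _
  unfold Spec_cut_value_from_bucket_assignment
  rw [A_eq, B_eq, triA_eq_tri, ← sum_tri_wbit counts side_pat counts.length]
  exact Finset.sum_congr rfl fun b _ => (wall_sub_wsame counts side_pat b counts.length).symm
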